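-- pv_equiv track=rewrite | github.com/Bapt252/SuperSmartMatch-Service | algorithms/smart_match.py | _same_city
-- ===== SOURCE A (Python) =====
-- def _same_city(location1: str, location2: str) -> bool:
--     """
--     Vérifie si deux localisations sont dans la même ville
--     """
--     cities = {
--         'paris': ['paris', '75', 'ile-de-france', 'idf'],
--         'lyon': ['lyon', '69', 'rhone'],
--         'marseille': ['marseille', '13', 'bouches-du-rhone'],
--         'toulouse': ['toulouse', '31', 'haute-garonne'],
--         'lille': ['lille', '59', 'nord']
--     }
--
--     for city, keywords in cities.items():
--         if (any(keyword in location1 for keyword in keywords) and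
--             any(keyword in location2 for keyword in keywords)):
--             return True
--
--     return False
-- ===== SOURCE B (Python) =====
-- def _same_city(location1: str, location2: str) -> bool:
--     cities = {
--         'paris': ['paris', '75', 'ile-de-france', 'idf'],
--         'lyon': ['lyon', '69', 'rhone'],
--         'marseille': ['marseille', '13', 'bouches-du-rhone'],
--         'toulouse': ['toulouse', '31', 'haute-garonne'],
--         'lille': ['lille', '59', 'nord']
--     }
--     kw2city = {kw: city for city, kws in cities.items() for kw in kws}
--     maxlen = max(len(k) for k in kw2city)
--
--     def cities_of(loc):
--         found = set()
--         for i in range(len(loc)):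
--             for j in range(i, min(i + maxlen, len(loc))):
--                 city = kw2city.get(loc[i:j + 1])
--                 if city is not None:
--                     found.add(city)
--         return found
--
--     return not cities_of(location1).isdisjoint(cities_of(location2))
-- ===== Notes on version B (the rewrite author's own statement) =====
-- stated objective: alternative
-- what changed: Inverts the traversal: instead of searching each city keyword as a substring of the locations, B builds a keyword-to-city dict once, scans every bounded-length character window of each location and looks it up, collecting the set of matching cities per location, then tests whether the two sets are disjoint.
import Mathlib
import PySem

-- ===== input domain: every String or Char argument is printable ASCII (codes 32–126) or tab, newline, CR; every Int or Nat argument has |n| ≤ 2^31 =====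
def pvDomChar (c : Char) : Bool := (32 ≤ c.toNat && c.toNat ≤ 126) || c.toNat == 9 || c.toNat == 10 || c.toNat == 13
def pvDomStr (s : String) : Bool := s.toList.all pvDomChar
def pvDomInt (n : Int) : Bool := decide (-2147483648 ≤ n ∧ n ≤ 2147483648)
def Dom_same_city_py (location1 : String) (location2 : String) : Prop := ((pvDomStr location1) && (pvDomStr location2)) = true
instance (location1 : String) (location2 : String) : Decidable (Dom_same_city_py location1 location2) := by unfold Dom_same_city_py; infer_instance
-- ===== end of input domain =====

-- B replaces A's per-city loop of substring searches by the opposite traversal: it scans the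
-- POSITIONS of each location, looks every bounded-length window up in a keyword→city dict, and
-- tests whether the two resulting city sets are disjoint (objective: alternative traversal).

-- the literal dict of cities (insertion order), shared context of both programs
def pvCities : List (String × List String) :=
  [("paris", ["paris", "75", "ile-de-france", "idf"]),
   ("lyon", ["lyon", "69", "rhone"]),
   ("marseille", ["marseille", "13", "bouches-du-rhone"]),
   ("toulouse", ["toulouse", "31", "haute-garonne"]),
   ("lille", ["lille", "59", "nord"])]

-- ===== PORT A =====
-- the 'for city, keywords in cities.items(): if … and …: return True' loop, early return as recursion
def pvLoopA (items : List (String × List String)) (location1 location2 : String) : Bool :=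
  match items with
  | [] => false
  | (_, keywords) :: rest =>
      if (keywords.any (fun keyword => PySem.Str.isIn keyword location1)) &&
         (keywords.any (fun keyword => PySem.Str.isIn keyword location2)) then
        true
      else pvLoopA rest location1 location2

def same_city_py (location1 : String) (location2 : String) : Bool :=
  pvLoopA pvCities location1 location2

-- ===== PORT B =====
-- kw2city = {kw: city for city, kws in cities.items() for kw in kws}
def pvKw2City : PySem.Dict String String :=
  pvCities.foldl (fun d p => p.2.foldl (fun d kw => d.insert kw p.1) d) PySem.Dict.empty

-- maxlen = max(len(k) for k in kw2city)  (the dict is a nonempty literal, so Python's max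
-- returns; `.getD 0` only totalises the Option)
def pvMaxLen : Int :=
  (PySem.List.max? ((PySem.Dict.keys pvKw2City).map (fun k => PySem.Str.len k)) id).getD 0

-- def cities_of(loc): nested loop over window starts i and ends j, dict lookup on the slice
def pvCitiesOf (loc : String) : PySem.Set String :=
  (PySem.List.pyRange 0 (PySem.Str.len loc) 1).foldl (fun found i =>
    (PySem.List.pyRange i (min (i + pvMaxLen) (PySem.Str.len loc)) 1).foldl (fun found j =>
      match PySem.Dict.get? pvKw2City (PySem.Str.slice loc (some i) (some (j + 1))) with
      | some city => found.add city
      | none => found) found) PySem.Set.empty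

-- return not cities_of(location1).isdisjoint(cities_of(location2))
def same_city_py_alt (location1 : String) (location2 : String) : Bool :=
  !(PySem.Set.isdisjoint (pvCitiesOf location1) (pvCitiesOf location2))

-- ===== PRECONDITION & SPEC =====
def Spec_same_city_py (location1 : String) (location2 : String) (out : Bool) : Prop := out = same_city_py_alt location1 location2
instance (location1 : String) (location2 : String) (out : Bool) : Decidable (Spec_same_city_py location1 location2 out) := by unfold Spec_same_city_py; infer_instance

-- ===== CLAIM (what is proved, stated in full; the proofs are below) =====
def Claim_equal_same_city_py : Prop := ∀ (location1 : String) (location2 : String), Dom_same_city_py location1 location2 → Spec_same_city_py location1 location2 (same_city_py location1 location2)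

-- ===== LEMMAS AND PROOFS =====

-- per-city match predicate used by A
def pvMatch (p : String × List String) (loc : String) : Bool :=
  p.2.any (fun k => PySem.Str.isIn k loc)

lemma pvLoopA_eq_any (items : List (String × List String)) (l1 l2 : String) :
    pvLoopA items l1 l2 = items.any (fun p => pvMatch p l1 && pvMatch p l2) := by
  induction items with
  | nil => rfl
  | cons p rest ih =>
      obtain ⟨c, kws⟩ := p
      simp only [pvLoopA, ih, Bool.if_true_left, Bool.decide_eq_true, List.any_cons, pvMatch]

-- the items of the keyword→city dict as a literal association list
def pvItems : List (String × String) :=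
  [("paris", "paris"), ("75", "paris"), ("ile-de-france", "paris"), ("idf", "paris"),
   ("lyon", "lyon"), ("69", "lyon"), ("rhone", "lyon"),
   ("marseille", "marseille"), ("13", "marseille"), ("bouches-du-rhone", "marseille"),
   ("toulouse", "toulouse"), ("31", "toulouse"), ("haute-garonne", "toulouse"),
   ("lille", "lille"), ("59", "lille"), ("nord", "lille")]

lemma pvKw2City_eq : pvKw2City = ⟨pvItems⟩ := by decide

lemma pvMaxLen_eq : pvMaxLen = 16 := by decide

-- dict lookup on the literal dict = membership in its item list (keys are distinct)
lemma pvGet_iff (s y : String) :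
    PySem.Dict.get? pvKw2City s = some y ↔ (s, y) ∈ pvItems := by
  exact (PySem.Dict.get?_eq_some_iff_mem_items pvKw2City s y (by decide)).trans
    (by rw [pvKw2City_eq])

-- every keyword in the dict is nonempty and at most 16 characters long
lemma pvItems_len : ∀ p ∈ pvItems, 0 < p.1.toList.length ∧ p.1.toList.length ≤ 16 := by decide

-- dict entries ↔ the (city, keywords) table of A
lemma pvItems_mem_iff (s y : String) :
    (s, y) ∈ pvItems ↔ ∃ p ∈ pvCities, p.1 = y ∧ s ∈ p.2 := by
  constructor
  · intro h; fin_cases h <;> decide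
  · rintro ⟨p, hp, rfl, h2⟩
    fin_cases hp <;> fin_cases h2 <;> decide

-- membership in a fold that conditionally adds g x
lemma mem_foldl_addOpt (g : Int → Option String) (xs : List Int) (s0 : PySem.Set String) (y : String) :
    y ∈ xs.foldl (fun s x => match g x with | some c => s.add c | none => s) s0 ↔
      y ∈ s0 ∨ ∃ x ∈ xs, g x = some y := by
  induction xs generalizing s0 with
  | nil => simp
  | cons x xs ih =>
      rcases hg : g x with _ | c <;>
        simp only [List.foldl_cons, hg, ih, PySem.Set.mem_add, List.mem_cons] <;>
        constructor
      · rintro (h | ⟨z, hz, h⟩)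
        · exact Or.inl h
        · exact Or.inr ⟨z, Or.inr hz, h⟩
      · rintro (h | ⟨z, hz | hz, h⟩)
        · exact Or.inl h
        · subst hz; rw [hg] at h; cases h
        · exact Or.inr ⟨z, hz, h⟩
      · rintro ((h | h) | ⟨z, hz, h⟩)
        · exact Or.inl h
        · exact Or.inr ⟨x, Or.inl rfl, by rw [hg, h]⟩
        · exact Or.inr ⟨z, Or.inr hz, h⟩
      · rintro (h | ⟨z, hz | hz, h⟩)
        · exact Or.inl (Or.inl h)
        · subst hz; rw [hg] at h
          exact Or.inl (Or.inr (Option.some.inj h).symm)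
        · exact Or.inr ⟨z, hz, h⟩

-- membership in the nested fold of pvCitiesOf
lemma mem_nested (rng : Int → List Int) (G : Int → Int → Option String)
    (xs : List Int) (s0 : PySem.Set String) (y : String) :
    y ∈ xs.foldl (fun s i =>
        (rng i).foldl (fun s j => match G i j with | some c => s.add c | none => s) s) s0 ↔
      y ∈ s0 ∨ ∃ i ∈ xs, ∃ j ∈ rng i, G i j = some y := by
  induction xs generalizing s0 with
  | nil => simp
  | cons x xs ih =>
      simp only [List.foldl_cons, ih, mem_foldl_addOpt, List.mem_cons]
      constructor
      · rintro ((h | ⟨j, hj, h⟩) | ⟨i, hi, j, hj, h⟩)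
        · exact Or.inl h
        · exact Or.inr ⟨x, Or.inl rfl, j, hj, h⟩
        · exact Or.inr ⟨i, Or.inr hi, j, hj, h⟩
      · rintro (h | ⟨i, hi | hi, j, hj, h⟩)
        · exact Or.inl (Or.inl h)
        · subst hi; exact Or.inl (Or.inr ⟨j, hj, h⟩)
        · exact Or.inr ⟨i, hi, j, hj, h⟩

-- a window of a string found at position i..j is an infix
lemma pvCitiesOf_mem (loc y : String) :
    y ∈ pvCitiesOf loc ↔
      ∃ i ∈ PySem.List.pyRange 0 (PySem.Str.len loc) 1,
        ∃ j ∈ PySem.List.pyRange i (min (i + 16) (PySem.Str.len loc)) 1,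
          PySem.Dict.get? pvKw2City (PySem.Str.slice loc (some i) (some (j + 1))) = some y := by
  rw [pvCitiesOf]
  rw [mem_nested (fun i => PySem.List.pyRange i (min (i + pvMaxLen) (PySem.Str.len loc)) 1)
      (fun i j => PySem.Dict.get? pvKw2City (PySem.Str.slice loc (some i) (some (j + 1))))]
  simp [pvMaxLen_eq]

-- windows ↔ substring containment, for keywords of length 1..16
lemma pvFound_iff_isIn (loc kw : String) (h1 : 0 < kw.toList.length) (h2 : kw.toList.length ≤ 16) :
    (∃ i ∈ PySem.List.pyRange 0 (PySem.Str.len loc) 1,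
      ∃ j ∈ PySem.List.pyRange i (min (i + 16) (PySem.Str.len loc)) 1,
        PySem.Str.slice loc (some i) (some (j + 1)) = kw) ↔ PySem.Str.isIn kw loc = true := by
  rw [PySem.Str.isIn_eq, ← PySem.Chars.exists_prefix_drop_iff_isIn]
  constructor
  · rintro ⟨i, hi, j, hj, hslice⟩
    rw [PySem.List.mem_pyRange_one] at hi hj
    have h0i : 0 ≤ i := hi.1
    have h0j1 : (0 : Int) ≤ j + 1 := by omega
    refine ⟨i.toNat, ?_⟩
    have h := congrArg String.toList hslice
    rw [PySem.Str.toList_slice, PySem.Chars.slice_eq_listSlice,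
        PySem.List.slice_toNat _ h0i h0j1] at h
    rw [← h]
    exact (loc.toList.drop i.toNat).take_prefix _
  · rintro ⟨t, ht⟩
    have hlen : kw.toList.length ≤ (loc.toList.drop t).length := ht.length_le
    rw [List.length_drop] at hlen
    refine ⟨(t : Int), ?_, (t : Int) + kw.toList.length - 1, ?_, ?_⟩
    · simp only [PySem.List.mem_pyRange_one, PySem.Str.len_eq]
      omega
    · simp only [PySem.List.mem_pyRange_one, PySem.Str.len_eq, lt_min_iff]
      omega
    · have h0 : (0 : Int) ≤ (t : Int) := by positivity
      have h1' : (0 : Int) ≤ (t : Int) + kw.toList.length - 1 + 1 := by omega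
      apply String.toList_inj.mp
      rw [PySem.Str.toList_slice, PySem.Chars.slice_eq_listSlice,
          PySem.List.slice_toNat _ h0 h1']
      have e1 : ((t : Int) + kw.toList.length - 1 + 1).toNat - ((t : Int)).toNat
          = kw.toList.length := by omega
      have e2 : ((t : Int)).toNat = t := by omega
      rw [e1, e2]
      exact (List.prefix_iff_eq_take.mp ht).symm

-- the city keys of the literal table are distinct: a key determines its entry
lemma pvCities_key_det (p q : String × List String)
    (hp : p ∈ pvCities) (hq : q ∈ pvCities) (h : p.1 = q.1) : p = q := by
  fin_cases hp <;> fin_cases hq <;> simp_all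

-- y is in B's city set iff A's row for y matches loc
lemma pvCitiesOf_iff_match (loc y : String) :
    y ∈ pvCitiesOf loc ↔ ∃ p ∈ pvCities, p.1 = y ∧ pvMatch p loc = true := by
  rw [pvCitiesOf_mem]
  constructor
  · rintro ⟨i, hi, j, hj, hget⟩
    rw [pvGet_iff] at hget
    obtain ⟨hl1, hl2⟩ := pvItems_len _ hget
    obtain ⟨p, hp, he, hkw⟩ := (pvItems_mem_iff _ _).1 hget
    refine ⟨p, hp, he, ?_⟩
    rw [pvMatch, List.any_eq_true]
    exact ⟨_, hkw, (pvFound_iff_isIn loc _ hl1 hl2).1 ⟨i, hi, j, hj, rfl⟩⟩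
  · rintro ⟨p, hp, he, hm⟩
    rw [pvMatch, List.any_eq_true] at hm
    obtain ⟨kw, hkw, hin⟩ := hm
    have hmem : (kw, y) ∈ pvItems := (pvItems_mem_iff _ _).2 ⟨p, hp, he, hkw⟩
    obtain ⟨hl1, hl2⟩ := pvItems_len _ hmem
    obtain ⟨i, hi, j, hj, hs⟩ := (pvFound_iff_isIn loc kw hl1 hl2).2 hin
    exact ⟨i, hi, j, hj, by rw [hs, pvGet_iff]; exact hmem⟩

-- ===== VERDICT =====
theorem same_city_py_spec : Claim_equal_same_city_py := by
  intro l1 l2 _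
  unfold Spec_same_city_py
  rw [same_city_py, pvLoopA_eq_any, same_city_py_alt]
  rcases hb : PySem.Set.isdisjoint (pvCitiesOf l1) (pvCitiesOf l2) with _ | _
  · -- not disjoint: some city in both sets
    simp only [Bool.not_false]
    obtain ⟨y, hy1, hy2⟩ : ∃ y, y ∈ pvCitiesOf l1 ∧ y ∈ pvCitiesOf l2 := by
      by_contra hno
      have : PySem.Set.isdisjoint (pvCitiesOf l1) (pvCitiesOf l2) = true :=
        (PySem.Set.isdisjoint_iff _ _).2 (fun x h1 h2 => hno ⟨x, h1, h2⟩)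
      rw [hb] at this; cases this
    obtain ⟨p1, hp1, he1, hm1⟩ := (pvCitiesOf_iff_match l1 y).1 hy1
    obtain ⟨p2, hp2, he2, hm2⟩ := (pvCitiesOf_iff_match l2 y).1 hy2
    have : p1 = p2 := pvCities_key_det p1 p2 hp1 hp2 (he1.trans he2.symm)
    subst this
    rw [List.any_eq_true]
    exact ⟨p1, hp1, by simp [hm1, hm2]⟩
  · -- disjoint: no city matches both
    simp only [Bool.not_true]
    rw [PySem.Set.isdisjoint_iff] at hb
    rw [List.any_eq_false]
    intro p hp
    by_contra hc
    rw [Bool.and_eq_true] at hc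
    exact hb p.1 ((pvCitiesOf_iff_match l1 p.1).2 ⟨p, hp, rfl, hc.1⟩)
             ((pvCitiesOf_iff_match l2 p.1).2 ⟨p, hp, rfl, hc.2⟩)
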